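-- pv_equiv track=rewrite | github.com/basty85/advent-of-code-2025-python | aoc/year2025/day3a.py | find_highest_value_per_bank
-- ===== SOURCE A (Python) =====
-- def find_highest_value_per_bank(input_str: str) -> int:
--     """Finds the highest possible value per bank and returns it as an int"""
--     for i in range(9, -1, -1):
--         pos1 = input_str.find(str(i))
--         if pos1 != -1:
--             for j in range(9, -1, -1):
--                 pos2 = input_str.find(str(j), pos1 + 1)
--                 if pos2 != -1:
--                     return int(f"{i}{j}")
--     return None  # If no two valid values exist
-- ===== SOURCE B (Python) =====
-- def find_highest_value_per_bank(input_str: str) -> int: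
--     """Finds the highest possible value per bank and returns it as an int"""
--     digits = [ord(c) - 48 for c in input_str if '0' <= c <= '9']
--     if len(digits) < 2:
--         return None
--     tens = max(digits[:-1])
--     units = max(digits[digits.index(tens) + 1:])
--     return 10 * tens + units
-- ===== Notes on version B (the rewrite author's own statement) =====
-- stated objective: simpler
-- what changed: A runs up to 100 substring searches (str.find for every digit pair, descending); B filters the digit values out of the string once and combines max over digits[:-1], the first index of that maximum, and max over the tail to build the same two-digit value.
import Mathlib
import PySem

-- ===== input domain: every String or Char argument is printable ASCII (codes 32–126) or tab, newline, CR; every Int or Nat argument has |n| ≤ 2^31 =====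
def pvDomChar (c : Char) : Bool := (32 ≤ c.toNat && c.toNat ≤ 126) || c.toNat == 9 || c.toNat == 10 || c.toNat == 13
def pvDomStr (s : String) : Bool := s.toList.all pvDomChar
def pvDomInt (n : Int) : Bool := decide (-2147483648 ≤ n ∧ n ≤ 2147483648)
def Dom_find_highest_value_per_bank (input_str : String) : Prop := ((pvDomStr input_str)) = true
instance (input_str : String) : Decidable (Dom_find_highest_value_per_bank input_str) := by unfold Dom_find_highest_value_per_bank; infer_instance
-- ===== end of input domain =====

-- B filters the digit characters once and combines max/index/slice, replacing A's 100 substring searches; objective: simpler.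


-- ===== PORT A =====
-- inner 'for j in range(9, -1, -1)' loop; a 'return' is modelled by returning 'some'.
-- int(f"{i}{j}") is PySem.Int.ofChars? (toChars i ++ toChars j); for the digits reached here it is always 'some'.
def fhvInnerLoop (input_str : String) (i pos1 : Int) : List Int → Option Int
  | [] => none
  | j :: rest =>
    let pos2 := PySem.Str.findFrom input_str (PySem.Int.toStr j) (pos1 + 1)
    if pos2 ≠ -1 then
      PySem.Int.ofChars? (PySem.Int.toChars i ++ PySem.Int.toChars j)
    else fhvInnerLoop input_str i pos1 rest

-- outer 'for i in range(9, -1, -1)' loop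
def fhvOuterLoop (input_str : String) : List Int → Option Int
  | [] => none
  | i :: rest =>
    let pos1 := PySem.Str.find input_str (PySem.Int.toStr i)
    if pos1 ≠ -1 then
      match fhvInnerLoop input_str i pos1 (PySem.List.pyRange 9 (-1) (-1)) with
      | some v => some v
      | none => fhvOuterLoop input_str rest
    else fhvOuterLoop input_str rest

def find_highest_value_per_bank (input_str : String) : Option Int :=
  fhvOuterLoop input_str (PySem.List.pyRange 9 (-1) (-1))

-- ===== PORT B =====
def find_highest_value_per_bank_alt (input_str : String) : Option Int :=
  let digits : List Int := input_str.toList.filterMap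
    (fun c => if '0' ≤ c ∧ c ≤ '9' then some ((c.toNat : Int) - 48) else none)
  if digits.length < 2 then none
  else
    match PySem.List.max? (PySem.List.slice digits none (some (-1))) (fun x => x) with
    | none => none   -- unreachable: digits[:-1] is nonempty
    | some tens =>
      match PySem.List.index? digits tens with
      | none => none -- unreachable: tens ∈ digits
      | some k =>
        match PySem.List.max? (PySem.List.slice digits (some ((k : Int) + 1)) none) (fun x => x) with
        | none => none  -- unreachable: tens occurs before the last digit
        | some units => some (10 * tens + units)

-- ===== PRECONDITION & SPEC =====
def Spec_find_highest_value_per_bank (input_str : String) (out : Option Int) : Prop := out = find_highest_value_per_bank_alt input_str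
instance (input_str : String) (out : Option Int) : Decidable (Spec_find_highest_value_per_bank input_str out) := by unfold Spec_find_highest_value_per_bank; infer_instance

-- ===== CLAIM (what is proved, stated in full; the proofs are below) =====
def Claim_equal_find_highest_value_per_bank : Prop := ∀ (input_str : String), Dom_find_highest_value_per_bank input_str → Spec_find_highest_value_per_bank input_str (find_highest_value_per_bank input_str)

-- ===== LEMMAS AND PROOFS =====

def pvDval (c : Char) : Option Int := if '0' ≤ c ∧ c ≤ '9' then some ((c.toNat : Int) - 48) else none
def pvDigits (L : List Char) : List Int := L.filterMap pvDval
def pvDchar (v : Int) : Char := Char.ofNat (48 + v.toNat)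

lemma pvAlt_def (s : String) :
    find_highest_value_per_bank_alt s =
      (if (pvDigits s.toList).length < 2 then none
       else
         match PySem.List.max? (PySem.List.slice (pvDigits s.toList) none (some (-1))) (fun x => x) with
         | none => none
         | some tens =>
           match PySem.List.index? (pvDigits s.toList) tens with
           | none => none
           | some k =>
             match PySem.List.max? (PySem.List.slice (pvDigits s.toList) (some ((k : Int) + 1)) none) (fun x => x) with
             | none => none
             | some units => some (10 * tens + units)) := rfl

lemma pvInfix_singleton (c : Char) (L : List Char) : [c] <:+: L ↔ c ∈ L := by
  constructor
  · intro h; exact h.mem (by simp)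
  · intro h; obtain ⟨s, t, rfl⟩ := List.append_of_mem h; exact ⟨s, t, by simp⟩

lemma pvDval_dchar (v : Int) (h0 : 0 ≤ v) (h9 : v ≤ 9) : pvDval (pvDchar v) = some v := by
  interval_cases v <;> decide

lemma pvDchar_val (c : Char) (h1 : '0' ≤ c) (h2 : c ≤ '9') : pvDchar ((c.toNat : Int) - 48) = c := by
  have h1' : 48 ≤ c.toNat := h1
  have h2' : c.toNat ≤ 57 := h2
  have h : 48 + ((c.toNat : Int) - 48).toNat = c.toNat := by omega
  unfold pvDchar
  rw [h]
  exact Char.ofNat_toNat c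

lemma pvDval_eq_some (c : Char) (v : Int) (h : pvDval c = some v) :
    ('0' ≤ c ∧ c ≤ '9') ∧ v = (c.toNat : Int) - 48 ∧ c = pvDchar v := by
  unfold pvDval at h
  split at h
  · rename_i hc
    have hv : v = (c.toNat : Int) - 48 := (Option.some.injEq _ _ ▸ h).symm
    exact ⟨hc, hv, by rw [hv]; exact (pvDchar_val c hc.1 hc.2).symm⟩
  · exact absurd h (by simp)

lemma pvMem_digits_bound (L : List Char) (v : Int) (h : v ∈ pvDigits L) : 0 ≤ v ∧ v ≤ 9 := by
  obtain ⟨c, _, hv⟩ := List.mem_filterMap.1 h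
  obtain ⟨⟨h1, h2⟩, hveq, _⟩ := pvDval_eq_some c v hv
  have h1' : 48 ≤ c.toNat := h1
  have h2' : c.toNat ≤ 57 := h2
  omega

lemma pvMem_digits_iff (L : List Char) (v : Int) (h0 : 0 ≤ v) (h9 : v ≤ 9) :
    v ∈ pvDigits L ↔ pvDchar v ∈ L := by
  constructor
  · intro h
    obtain ⟨c, hc, hv⟩ := List.mem_filterMap.1 h
    obtain ⟨_, _, hceq⟩ := pvDval_eq_some c v hv
    exact hceq ▸ hc
  · intro h
    exact List.mem_filterMap.2 ⟨pvDchar v, h, pvDval_dchar v h0 h9⟩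

lemma pvToChars_digit (v : Int) (h0 : 0 ≤ v) (h9 : v ≤ 9) :
    PySem.Int.toChars v = [pvDchar v] := by
  interval_cases v <;> decide

lemma pvDigits_append (xs ys : List Char) : pvDigits (xs ++ ys) = pvDigits xs ++ pvDigits ys :=
  List.filterMap_append

lemma pvOfChars_pair (i j : Int) (hi0 : 0 ≤ i) (hi9 : i ≤ 9) (hj0 : 0 ≤ j) (hj9 : j ≤ 9) :
    PySem.Int.ofChars? (PySem.Int.toChars i ++ PySem.Int.toChars j) = some (10 * i + j) := by
  interval_cases i <;> interval_cases j <;> decide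

-- splitting the countdown range at m
lemma pvRange_split (m : Int) (h0 : -1 ≤ m) (h9 : m ≤ 9) :
    PySem.List.pyRange 9 (-1) (-1) = PySem.List.pyRange 9 m (-1) ++ PySem.List.pyRange m (-1) (-1) := by
  rw [PySem.List.pyRange_neg_one_eq_reverse, PySem.List.pyRange_neg_one_eq_reverse,
      PySem.List.pyRange_neg_one_eq_reverse, ← List.reverse_append,
      ← PySem.List.pyRange_one_append (-1 + 1) (m + 1) (9 + 1) (by omega) (by omega)]

-- the inner loop skips every j whose digit char does not occur after position p
lemma pvInner_skip_list (s : String) (i : Int) (p : Nat) (hp : p + 1 ≤ s.toList.length)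
    (js ks : List Int)
    (h : ∀ j ∈ js, 0 ≤ j ∧ j ≤ 9 ∧ j ∉ pvDigits (s.toList.drop (p + 1))) :
    fhvInnerLoop s i (p : Int) (js ++ ks) = fhvInnerLoop s i (p : Int) ks := by
  induction js with
  | nil => simp
  | cons j rest ih =>
    obtain ⟨hj0, hj9, hnot⟩ := h j (by simp)
    have hff : PySem.Str.findFrom s (PySem.Int.toStr j) ((p : Int) + 1) = -1 := by
      have hcast : ((p : Int) + 1) = ((p + 1 : Nat) : Int) := by push_cast; ring
      rw [hcast, PySem.Str.findFrom_eq, PySem.Int.toList_toStr, pvToChars_digit j hj0 hj9,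
          PySem.Chars.findFrom_natCast_eq_neg_one_iff _ _ _ hp, pvInfix_singleton]
      intro hc
      exact hnot ((pvMem_digits_iff _ j hj0 hj9).2 hc)
    rw [List.cons_append]
    simp only [fhvInnerLoop, hff]
    simpa using ih (fun j' hj' => h j' (by simp [hj']))

-- the inner loop returns the pair value at the first j present after position p
lemma pvInner_hit (s : String) (i j : Int) (p : Nat) (hp : p + 1 ≤ s.toList.length)
    (hj0 : 0 ≤ j) (hj9 : j ≤ 9) (hmem : j ∈ pvDigits (s.toList.drop (p + 1))) (js : List Int) :
    fhvInnerLoop s i (p : Int) (j :: js) =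
      PySem.Int.ofChars? (PySem.Int.toChars i ++ PySem.Int.toChars j) := by
  have hff : PySem.Str.findFrom s (PySem.Int.toStr j) ((p : Int) + 1) ≠ -1 := by
    have hcast : ((p : Int) + 1) = ((p + 1 : Nat) : Int) := by push_cast; ring
    rw [hcast, PySem.Str.findFrom_eq, PySem.Int.toList_toStr, pvToChars_digit j hj0 hj9,
        ne_eq, PySem.Chars.findFrom_natCast_eq_neg_one_iff _ _ _ hp, not_not, pvInfix_singleton]
    exact (pvMem_digits_iff _ j hj0 hj9).1 hmem
  have hffC : ¬ PySem.Chars.findFrom s.toList (PySem.Int.toChars j) ((p : Int) + 1) none = -1 := by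
    simpa using hff
  simp [fhvInnerLoop, hffC]

-- first-occurrence facts for a successful find
lemma pvFind_first (L : List Char) (c : Char) (h : c ∈ L) :
    ∃ p : Nat, PySem.Chars.find L [c] = (p : Int) ∧ p < L.length ∧
      L = L.take p ++ c :: L.drop (p + 1) ∧ c ∉ L.take p := by
  have hne : PySem.Chars.find L [c] ≠ -1 :=
    (PySem.Chars.find_ne_neg_one_iff L [c]).2 ((pvInfix_singleton c L).2 h)
  have hge : -1 ≤ PySem.Chars.find L [c] := PySem.Chars.neg_one_le_find L [c]
  have h0 : 0 ≤ PySem.Chars.find L [c] := by omega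
  obtain ⟨hpre, hmin⟩ := PySem.Chars.find_spec h0
  obtain ⟨t, ht⟩ := hpre
  have hplen : (PySem.Chars.find L [c]).toNat < L.length := by
    have := congrArg List.length ht
    simp at this
    omega
  refine ⟨(PySem.Chars.find L [c]).toNat, by omega, hplen, ?_, ?_⟩
  · have hd1 : L.drop ((PySem.Chars.find L [c]).toNat + 1) = t := by
      have h2 : L.drop ((PySem.Chars.find L [c]).toNat + 1)
          = (L.drop (PySem.Chars.find L [c]).toNat).drop 1 := by rw [List.drop_drop]
      rw [h2, ← ht]
      simp
    calc L = L.take (PySem.Chars.find L [c]).toNat ++ L.drop (PySem.Chars.find L [c]).toNat :=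
            (List.take_append_drop _ L).symm
    _ = L.take (PySem.Chars.find L [c]).toNat ++ c :: L.drop ((PySem.Chars.find L [c]).toNat + 1) := by
          rw [← ht, hd1]
          rfl
  · intro hmem
    obtain ⟨q, hq, hqe⟩ := List.mem_iff_getElem.1 hmem
    have hqm : q < min (PySem.Chars.find L [c]).toNat L.length := by
      simpa [List.length_take] using hq
    have hq1 : q < (PySem.Chars.find L [c]).toNat := lt_min_iff.1 hqm |>.1
    have hq2 : q < L.length := lt_min_iff.1 hqm |>.2
    rw [List.getElem_take] at hqe
    apply hmin q hq1
    have hdq : L.drop q = c :: L.drop (q + 1) := by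
      rw [List.drop_eq_getElem_cons hq2, hqe]
    exact ⟨L.drop (q + 1), hdq.symm⟩

-- the outer loop skips every i not occurring strictly before the last digit
lemma pvOuter_skip_list (s : String) (is ks : List Int)
    (h : ∀ i ∈ is, 0 ≤ i ∧ i ≤ 9 ∧ i ∉ (pvDigits s.toList).dropLast) :
    fhvOuterLoop s (is ++ ks) = fhvOuterLoop s ks := by
  induction is with
  | nil => simp
  | cons i rest ih =>
    obtain ⟨hi0, hi9, hnot⟩ := h i (by simp)
    have hstep : fhvOuterLoop s (i :: (rest ++ ks)) = fhvOuterLoop s (rest ++ ks) := by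
      by_cases hc : pvDchar i ∈ s.toList
      · obtain ⟨p, hfind, hlt, hdecomp, hnottake⟩ := pvFind_first s.toList (pvDchar i) hc
        have hdig : pvDigits s.toList
            = pvDigits (s.toList.take p) ++ i :: pvDigits (s.toList.drop (p + 1)) := by
          conv_lhs => rw [hdecomp]
          rw [pvDigits_append]
          simp [pvDigits, pvDval_dchar i hi0 hi9]
        have hempty : pvDigits (s.toList.drop (p + 1)) = [] := by
          by_contra hneq
          apply hnot
          rw [hdig, List.dropLast_append_of_ne_nil (by simp), List.dropLast_cons_of_ne_nil hneq]
          simp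
        have hinner : fhvInnerLoop s i ((p : Int)) (PySem.List.pyRange 9 (-1) (-1)) = none := by
          have hsk := pvInner_skip_list s i p (by omega) (PySem.List.pyRange 9 (-1) (-1)) []
            (fun j hj => by
              have hmem := (PySem.List.mem_pyRange_neg_one).1 hj
              exact ⟨by omega, by omega, by rw [hempty]; simp⟩)
          simpa [fhvInnerLoop] using hsk
        have hfind' : PySem.Str.find s (PySem.Int.toStr i) = (p : Int) := by
          rw [PySem.Str.find_eq, PySem.Int.toList_toStr, pvToChars_digit i hi0 hi9]
          exact hfind
        have hpne : ((p : Int)) ≠ -1 := by omega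
        simp only [fhvOuterLoop, hfind', hpne, ne_eq, not_false_iff, if_true, hinner]
      · have hfind' : PySem.Str.find s (PySem.Int.toStr i) = -1 := by
          rw [PySem.Str.find_eq, PySem.Int.toList_toStr, pvToChars_digit i hi0 hi9,
              PySem.Chars.find_eq_neg_one_iff, pvInfix_singleton]
          exact hc
        have hfindC : PySem.Chars.find s.toList (PySem.Int.toChars i) = -1 := by
          simpa using hfind'
        simp [fhvOuterLoop, hfindC]
    rw [List.cons_append, hstep]
    exact ih (fun i' hi' => h i' (by simp [hi']))

-- ===== VERDICT (by name: the statement is the Claim_ definition above) =====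
theorem find_highest_value_per_bank_spec : Claim_equal_find_highest_value_per_bank := by
  intro s _
  unfold Spec_find_highest_value_per_bank
  by_cases hlen : (pvDigits s.toList).length < 2
  · -- fewer than two digits: both sides return none
    have hB : find_highest_value_per_bank_alt s = none := by
      rw [pvAlt_def, if_pos hlen]
    have hdrop : (pvDigits s.toList).dropLast = [] := by
      have hl : (pvDigits s.toList).dropLast.length = 0 := by
        simp [List.length_dropLast]
        omega
      exact List.eq_nil_of_length_eq_zero hl
    have hA : find_highest_value_per_bank s = none := by
      unfold find_highest_value_per_bank
      have hsk := pvOuter_skip_list s (PySem.List.pyRange 9 (-1) (-1)) []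
        (fun i hi => by
          have hmem := (PySem.List.mem_pyRange_neg_one).1 hi
          exact ⟨by omega, by omega, by rw [hdrop]; simp⟩)
      simpa [fhvOuterLoop] using hsk
    rw [hA, hB]
  · rw [not_lt] at hlen
    have hdlne : (pvDigits s.toList).dropLast ≠ [] := by
      intro hnil
      have := congrArg List.length hnil
      simp [List.length_dropLast] at this
      omega
    obtain ⟨tens, htens⟩ : ∃ t, PySem.List.max? (pvDigits s.toList).dropLast (fun x => x) = some t := by
      cases hmx : PySem.List.max? (pvDigits s.toList).dropLast (fun x => x) with
      | none => exact absurd ((PySem.List.max?_eq_none_iff _ _).1 hmx) hdlne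
      | some t => exact ⟨t, rfl⟩
    have htmem : tens ∈ (pvDigits s.toList).dropLast := PySem.List.max?_mem htens
    have htmax : ∀ y ∈ (pvDigits s.toList).dropLast, y ≤ tens :=
      fun y hy => PySem.List.max?_isMax htens y hy
    have htD : tens ∈ pvDigits s.toList := List.mem_of_mem_dropLast htmem
    obtain ⟨k, hk⟩ : ∃ k, PySem.List.index? (pvDigits s.toList) tens = some k :=
      Option.isSome_iff_exists.1 ((PySem.List.index?_isSome_iff _ _).2 htD)
    obtain ⟨hklen, hkget, hkmin⟩ := PySem.List.getElem_of_index?_eq_some hk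
    obtain ⟨idx, hidx, hidxe⟩ := List.mem_iff_getElem.1 htmem
    rw [List.getElem_dropLast] at hidxe
    have hidxlen : idx < (pvDigits s.toList).length - 1 := by
      simpa [List.length_dropLast] using hidx
    have hkidx : k ≤ idx := by
      by_contra hgt
      exact hkmin idx (by omega) hidxe
    have hk1 : k + 1 < (pvDigits s.toList).length := by omega
    have hdropne : (pvDigits s.toList).drop (k + 1) ≠ [] := by
      intro hnil
      have := congrArg List.length hnil
      simp at this
      omega
    obtain ⟨units, hunits⟩ :
        ∃ u, PySem.List.max? ((pvDigits s.toList).drop (k + 1)) (fun x => x) = some u := by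
      cases hmx : PySem.List.max? ((pvDigits s.toList).drop (k + 1)) (fun x => x) with
      | none => exact absurd ((PySem.List.max?_eq_none_iff _ _).1 hmx) hdropne
      | some u => exact ⟨u, rfl⟩
    have humem : units ∈ (pvDigits s.toList).drop (k + 1) := PySem.List.max?_mem hunits
    have humax : ∀ y ∈ (pvDigits s.toList).drop (k + 1), y ≤ units :=
      fun y hy => PySem.List.max?_isMax hunits y hy
    -- B computes some (10 * tens + units)
    have hB : find_highest_value_per_bank_alt s = some (10 * tens + units) := by
      have hcast : PySem.List.slice (pvDigits s.toList) (some ((k : Int) + 1)) none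
          = (pvDigits s.toList).drop (k + 1) := by
        rw [show ((k : Int) + 1) = ((k + 1 : Nat) : Int) by push_cast; ring,
            PySem.List.slice_from_natCast]
      rw [pvAlt_def, if_neg (by omega), PySem.List.slice_to_neg_one]
      simp only [htens, hk, hcast, hunits]
    -- A computes some (10 * tens + units)
    have ht09 := pvMem_digits_bound s.toList tens htD
    have hcin : pvDchar tens ∈ s.toList := (pvMem_digits_iff s.toList tens ht09.1 ht09.2).1 htD
    obtain ⟨p, hfind, hplen, hdecomp, hnottake⟩ := pvFind_first s.toList (pvDchar tens) hcin
    have hdig : pvDigits s.toList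
        = pvDigits (s.toList.take p) ++ tens :: pvDigits (s.toList.drop (p + 1)) := by
      conv_lhs => rw [hdecomp]
      rw [pvDigits_append]
      simp [pvDigits, pvDval_dchar tens ht09.1 ht09.2]
    have hnotpre : tens ∉ pvDigits (s.toList.take p) := fun hmem =>
      hnottake ((pvMem_digits_iff _ tens ht09.1 ht09.2).1 hmem)
    have hk' : PySem.List.index? (pvDigits s.toList) tens
        = some (pvDigits (s.toList.take p)).length :=
      (PySem.List.index?_eq_some_iff _ _ _).2 ⟨_, _, hdig, rfl, hnotpre⟩
    have hkeq : k = (pvDigits (s.toList.take p)).length := by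
      rw [hk] at hk'
      exact Option.some.inj hk'
    have hsuf : (pvDigits s.toList).drop (k + 1) = pvDigits (s.toList.drop (p + 1)) := by
      rw [hdig, hkeq,
          show pvDigits (s.toList.take p) ++ tens :: pvDigits (s.toList.drop (p + 1))
             = (pvDigits (s.toList.take p) ++ [tens]) ++ pvDigits (s.toList.drop (p + 1)) by simp,
          List.drop_left' (by simp)]
    have humem' : units ∈ pvDigits (s.toList.drop (p + 1)) := by rw [← hsuf]; exact humem
    have hu09 := pvMem_digits_bound _ units humem'
    have hinner : fhvInnerLoop s tens ((p : Int)) (PySem.List.pyRange 9 (-1) (-1))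
        = some (10 * tens + units) := by
      rw [pvRange_split units (by omega) (by omega),
          pvInner_skip_list s tens p (by omega) _ _ (fun j hj => by
            have hmem := (PySem.List.mem_pyRange_neg_one).1 hj
            refine ⟨by omega, by omega, fun hjd => ?_⟩
            have hjd' : j ∈ (pvDigits s.toList).drop (k + 1) := by rw [hsuf]; exact hjd
            have := humax j hjd'
            omega),
          PySem.List.pyRange_neg_one_cons (by omega),
          pvInner_hit s tens units p (by omega) hu09.1 hu09.2 humem']
      exact pvOfChars_pair tens units ht09.1 ht09.2 hu09.1 hu09.2
    have hA : find_highest_value_per_bank s = some (10 * tens + units) := by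
      unfold find_highest_value_per_bank
      rw [pvRange_split tens (by omega) (by omega),
          pvOuter_skip_list s _ _ (fun i hi => by
            have hmem := (PySem.List.mem_pyRange_neg_one).1 hi
            refine ⟨by omega, by omega, fun hid => ?_⟩
            have := htmax i hid
            omega),
          PySem.List.pyRange_neg_one_cons (by omega)]
      have hfind' : PySem.Str.find s (PySem.Int.toStr tens) = (p : Int) := by
        rw [PySem.Str.find_eq, PySem.Int.toList_toStr, pvToChars_digit tens ht09.1 ht09.2]
        exact hfind
      have hpne : ((p : Int)) ≠ -1 := by omega
      simp only [fhvOuterLoop, hfind', hpne, ne_eq, not_false_iff, if_true, hinner]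
    rw [hA, hB]
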